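/- GENERATED by farm/mkstatement.py from design/units.tsv (unit `DGifSlurp.11`) and the assertions of Gif/Spec/Seg_DGifSlurp.lean — do not edit.
   THE STATEMENT of the proof unit `DGifSlurp.11`: segment 11 of `DGifSlurp` (21 instructions; entries 0x10a8a2;
   exits 0x10a8a2,0x10a81f,0x10a8ed; ranges 0x10a8a2-0x10a8ed)
   takes each of its entry assertions to one of its exit assertions (`Gif.Spec.DGifSlurp.Seg11`), given the contracts of its callees.
   What the names mean: ProgX/Base/Spec/Basic.lean (the shared hypotheses), Gif/Spec/Seg_DGifSlurp.lean (the assertions). The theorem to prove: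
   `theorem DGifSlurp_11_ok : Gif.Spec.DGifSlurp_11.Statement`. -/
import Gif.Code
import Gif.Dec.All
import Gif.Labels
import Gif.Spec.Alloc
import Gif.Spec.Reader
import Gif.Spec.Seg_DGifSlurp
namespace Gif.Spec.DGifSlurp_11
open X86 X86.User Asan

/-- The statement of unit `DGifSlurp.11`. -/
def Statement : Prop :=
  ∀ (Lay : Layout) (_hLay : Lay.hi = 0x1000000) (μ : Microarch) (_hμ : UserX.MicroOK μ) (u₀ : State)
    (_hcode : HasCodeNat Lay u₀ Gif.L.DGifSlurp.entry Gif.Code.code_DGifSlurp.nat Gif.L.DGifSlurp.size)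
    (_h_DGifGetExtensionNext : ∀ (H : Heap) (rest : List Obj) (frames : List (Nat × FrameLayout)) (F : Forest) (R : Rd), Calls Lay μ ProgX.Base.WayInv (ProgX.Base.conv u₀) Gif.L.DGifGetExtensionNext.entry (Gif.Spec.DGifGetExtensionNext.spec H rest frames F R))
    (_h_asan_load1_noabort : Asan.SmallCheck Lay μ ProgX.Base.WayInv (ProgX.Base.CodeOK u₀) [.rax, .rdx] 1 ProgX.Base.L.__asan_load1_noabort.entry)
    (_h_GifAddExtensionBlock : ∀ (H : Heap) (rest : List Obj) (frames : List (Nat × FrameLayout)) (F : Forest) (R : Rd) (len : Nat), Calls Lay μ ProgX.Base.WayInv (ProgX.Base.conv u₀) Gif.L.GifAddExtensionBlock.entry (Gif.Spec.GifAddExtensionBlock.spec H rest frames F R len)),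
    Gif.Spec.DGifSlurp.Seg11 Lay μ u₀

end Gif.Spec.DGifSlurp_11
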